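-- pv_equiv track=rewrite | github.com/Shash23/PhishPup | core/engine.py | _phrase_matches
-- ===== SOURCE A (Python) =====
-- from typing import Any, Dict, List, Optional, Tuple, Union
--
-- def _normalize(text: str) -> str:
--     if not text:
--         return ""
--     return " ".join(text.strip().split()).lower()
--
-- def _phrase_tokens(phrase: str) -> List[str]:
--     return _normalize(phrase).split()
--
-- def _phrase_matches(tokens: List[str], phrase: str) -> bool:
--     phrase_tok = _phrase_tokens(phrase)
--     if not phrase_tok:
--         return False
--     for i in range(len(tokens) - len(phrase_tok) + 1):
--         if tokens[i : i + len(phrase_tok)] == phrase_tok: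
--             return True
--     return False
-- ===== SOURCE B (Python) =====
-- def _phrase_matches(tokens, phrase):
--     # One left-to-right pass tracking all partial-match lengths simultaneously
--     # (prefix-set automaton) instead of slicing at every start index.
--     phrase_tok = " ".join(phrase.strip().split()).lower().split()
--     if not phrase_tok:
--         return False
--     m = len(phrase_tok)
--     states = []  # lengths j (0 < j < m) such that the last j tokens equal phrase_tok[:j]
--     for tok in tokens:
--         new_states = []
--         for j in [0] + states:
--             if phrase_tok[j] == tok:
--                 if j + 1 == m:
--                     return True
--                 new_states.append(j + 1)
--         states = new_states
--     return False
-- ===== Notes on version B (the rewrite author's own statement) =====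
-- stated objective: alternative
-- what changed: Replaced the index loop that compares a fresh slice tokens[i:i+m] at every start position with a single left-to-right pass that maintains the set of all current partial-match lengths (a prefix-set automaton), so no slices are built and each token is read once per active prefix.
import Mathlib
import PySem

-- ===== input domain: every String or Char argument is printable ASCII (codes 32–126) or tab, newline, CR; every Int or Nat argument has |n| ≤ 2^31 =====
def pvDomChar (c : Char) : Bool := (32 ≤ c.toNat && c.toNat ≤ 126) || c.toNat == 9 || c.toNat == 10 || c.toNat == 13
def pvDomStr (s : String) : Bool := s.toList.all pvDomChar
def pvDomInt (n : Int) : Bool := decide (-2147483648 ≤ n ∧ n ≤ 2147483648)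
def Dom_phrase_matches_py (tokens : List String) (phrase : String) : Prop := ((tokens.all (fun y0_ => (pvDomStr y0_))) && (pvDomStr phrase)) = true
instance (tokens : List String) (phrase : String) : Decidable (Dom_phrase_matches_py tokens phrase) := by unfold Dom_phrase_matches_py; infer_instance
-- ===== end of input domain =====

-- B replaces the slice-per-start-index scan with a single pass that tracks all partial-match
-- lengths at once (a prefix-set automaton); same results, no slices built (objective: alternative).

-- ===== PORT A =====
-- _normalize(text): 'if not text: return ""' ; '" ".join(text.strip().split()).lower()'
def pvNormalize (text : String) : String :=
  if text = "" then ""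
  else PySem.Str.lower (PySem.Str.join " " (PySem.Str.split₀ (PySem.Str.strip text)))

-- _phrase_tokens(phrase) = _normalize(phrase).split()
def pvPhraseTokens (phrase : String) : List String :=
  PySem.Str.split₀ (pvNormalize phrase)

def phrase_matches_py (tokens : List String) (phrase : String) : Bool :=
  let phrase_tok := pvPhraseTokens phrase
  if phrase_tok = [] then false
  else
    -- 'for i in range(len(tokens) - len(phrase_tok) + 1): if tokens[i:i+len(phrase_tok)] == phrase_tok: return True'
    (PySem.List.pyRange 0 ((tokens.length : Int) - (phrase_tok.length : Int) + 1) 1).foldl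
      (fun acc i =>
        if PySem.List.slice tokens (some i) (some (i + (phrase_tok.length : Int))) = phrase_tok
        then true else acc)
      false

-- ===== PORT B =====
-- inner loop 'for j in [0] + states: …'; 'none' encodes the early 'return True'.
-- phrase_tok[j] is ported as getD j "" — exact here since every reached j satisfies j < len(phrase_tok).
def pvAltStep (pt : List String) (m : Nat) (tok : String) : List Nat → Option (List Nat)
  | [] => some []
  | j :: js =>
    if pt.getD j "" = tok then
      if j + 1 = m then none
      else (pvAltStep pt m tok js).map (fun ns => (j + 1) :: ns)
    else pvAltStep pt m tok js

-- outer loop 'for tok in tokens', threading the states list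
def pvAltLoop (pt : List String) (m : Nat) : List String → List Nat → Bool
  | [], _ => false
  | tok :: rest, states =>
    match pvAltStep pt m tok (0 :: states) with
    | none => true
    | some ns => pvAltLoop pt m rest ns

def phrase_matches_py_alt (tokens : List String) (phrase : String) : Bool :=
  let phrase_tok :=
    PySem.Str.split₀ (PySem.Str.lower (PySem.Str.join " " (PySem.Str.split₀ (PySem.Str.strip phrase))))
  if phrase_tok = [] then false
  else pvAltLoop phrase_tok phrase_tok.length tokens []

-- ===== PRECONDITION & SPEC =====
def Spec_phrase_matches_py (tokens : List String) (phrase : String) (out : Bool) : Prop := out = phrase_matches_py_alt tokens phrase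
instance (tokens : List String) (phrase : String) (out : Bool) : Decidable (Spec_phrase_matches_py tokens phrase out) := by unfold Spec_phrase_matches_py; infer_instance

-- ===== CLAIM (what is proved, stated in full; the proofs are below) =====
def Claim_equal_phrase_matches_py : Prop := ∀ (tokens : List String) (phrase : String), Dom_phrase_matches_py tokens phrase → Spec_phrase_matches_py tokens phrase (phrase_matches_py tokens phrase)

-- ===== LEMMAS AND PROOFS =====

-- B's tokenization expression computes A's phrase tokens (the only difference is A's
-- 'if not text' guard, and both sides are [] on the empty string).
lemma tok_eq (phrase : String) :
    PySem.Str.split₀ (PySem.Str.lower (PySem.Str.join " " (PySem.Str.split₀ (PySem.Str.strip phrase))))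
      = pvPhraseTokens phrase := by
  by_cases h : phrase = ""
  · subst h; decide
  · simp [pvPhraseTokens, pvNormalize, h]

-- A's loop is true iff some window of length m equals pt
lemma portA_iff (tokens : List String) (phrase : String)
    (pt : List String) (hpt : pt = pvPhraseTokens phrase) (hne : pt ≠ []) :
    phrase_matches_py tokens phrase = true ↔
      ∃ i : Nat, i + pt.length ≤ tokens.length ∧ (tokens.drop i).take pt.length = pt := by
  unfold phrase_matches_py
  rw [← hpt, if_neg hne]
  have hfun : (fun (acc : Bool) (i : Int) => if PySem.List.slice tokens (some i) (some (i + (pt.length : Int))) = pt then true else acc)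
      = (fun acc i => if (fun i => decide (PySem.List.slice tokens (some i) (some (i + (pt.length : Int))) = pt)) i = true then true else acc) := by
    funext acc i; simp
  rw [hfun, PySem.List.foldl_if_true_eq _]
  simp only [Bool.false_or, List.any_eq_true, decide_eq_true_eq, PySem.List.mem_pyRange_one]
  constructor
  · rintro ⟨i, ⟨h0, hlt⟩, heq⟩
    lift i to Nat using h0 with j
    refine ⟨j, by omega, ?_⟩
    rwa [PySem.List.slice_natCast_add tokens j pt.length] at heq
  · rintro ⟨j, hle, heq⟩
    exact ⟨(j : Int), ⟨by positivity, by omega⟩,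
      by rwa [PySem.List.slice_natCast_add tokens j pt.length]⟩

-- pvAltStep returns none iff some j completes the phrase
lemma step_none_iff (pt : List String) (m : Nat) (tok : String) (js : List Nat) :
    pvAltStep pt m tok js = none ↔ ∃ j ∈ js, pt.getD j "" = tok ∧ j + 1 = m := by
  induction js with
  | nil => simp [pvAltStep]
  | cons j js ih =>
    simp only [pvAltStep]
    split_ifs with h1 h2
    · simp only [List.mem_cons, true_iff]
      exact ⟨j, Or.inl rfl, h1, h2⟩
    · simp only [Option.map_eq_none_iff, ih, List.mem_cons]
      constructor
      · rintro ⟨a, ha, hm⟩; exact ⟨a, Or.inr ha, hm⟩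
      · rintro ⟨a, ha | ha, hm⟩
        · exact absurd hm.2 (ha ▸ h2)
        · exact ⟨a, ha, hm⟩
    · simp only [ih, List.mem_cons]
      constructor
      · rintro ⟨a, ha, hm⟩; exact ⟨a, Or.inr ha, hm⟩
      · rintro ⟨a, ha | ha, hm⟩
        · exact absurd hm.1 (ha ▸ h1)
        · exact ⟨a, ha, hm⟩

-- on success, pvAltStep's output is exactly the advanced states
lemma step_some_mem (pt : List String) (m : Nat) (tok : String) (js ns : List Nat)
    (h : pvAltStep pt m tok js = some ns) :
    ∀ x, x ∈ ns ↔ ∃ j ∈ js, pt.getD j "" = tok ∧ x = j + 1 := by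
  induction js generalizing ns with
  | nil =>
    simp only [pvAltStep, Option.some_inj] at h
    subst h; simp
  | cons j js ih =>
    intro x
    simp only [pvAltStep] at h
    split_ifs at h with h1 h2
    · rw [Option.map_eq_some_iff] at h
      obtain ⟨ns', hns', rfl⟩ := h
      simp only [List.mem_cons, ih ns' hns' x]
      constructor
      · rintro (rfl | ⟨a, ha, hm, rfl⟩)
        · exact ⟨j, Or.inl rfl, h1, rfl⟩
        · exact ⟨a, Or.inr ha, hm, rfl⟩
      · rintro ⟨a, ha | ha, hm, rfl⟩
        · exact Or.inl (by rw [ha])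
        · exact Or.inr ⟨a, ha, hm, rfl⟩
    · rw [ih ns h x]
      constructor
      · rintro ⟨a, ha, hm⟩; exact ⟨a, List.mem_cons_of_mem _ ha, hm⟩
      · rintro ⟨a, ha, hm⟩
        rcases List.mem_cons.mp ha with rfl | ha'
        · exact absurd hm.1 h1
        · exact ⟨a, ha', hm⟩

-- a (j+1)-token suffix of P ++ [tok] matches pt iff the j-token suffix of P does and pt[j] = tok
lemma ext_iff (P : List String) (tok : String) (pt : List String) (j : Nat)
    (hjP : j ≤ P.length) (hjm : j < pt.length) :
    (P ++ [tok]).drop (P.length - j) = pt.take (j + 1) ↔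
      (P.drop (P.length - j) = pt.take j ∧ pt.getD j "" = tok) := by
  rw [List.drop_append_of_le_length (by omega), List.take_add_one,
    List.getElem?_eq_getElem hjm, List.getD_eq_getElem pt "" hjm]
  simp only [Option.toList_some]
  constructor
  · intro h
    have := List.append_inj h (by simp [List.length_drop, List.length_take]; omega)
    exact ⟨this.1, by simpa [eq_comm] using this.2⟩
  · rintro ⟨h1, h2⟩
    rw [h1, h2]

-- a window ending exactly at the end of X equals the tail of X
lemma window_end (X R pt : List String) (i : Nat) (h : i + pt.length = X.length) :
    ((X ++ R).drop i).take pt.length = pt ↔ X.drop i = pt := by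
  rw [List.drop_append_of_le_length (by omega), List.take_append, List.length_drop,
    show X.length - i = pt.length by omega, Nat.sub_self, List.take_zero, List.append_nil,
    List.take_of_length_le (by rw [List.length_drop]; omega)]

-- the loop invariant: states holds exactly the partial-match lengths of the processed prefix P,
-- and the loop succeeds iff some window of length m ending inside rest equals pt
lemma loop_iff (pt : List String) (m : Nat) (hm : m = pt.length) (hne : pt ≠ []) :
    ∀ (rest P : List String) (states : List Nat),
    (∀ j, j ∈ states ↔ (0 < j ∧ j < m ∧ j ≤ P.length ∧ P.drop (P.length - j) = pt.take j)) →
    (pvAltLoop pt m rest states = true ↔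
      ∃ i : Nat, i + m ≤ P.length + rest.length ∧ P.length < i + m ∧
        ((P ++ rest).drop i).take m = pt)
  | [], P, states, hst => by
    simp only [pvAltLoop, List.length_nil, Bool.false_eq_true, false_iff]
    rintro ⟨i, h1, h2, _⟩; omega
  | tok :: rest, P, states, hst => by
    subst hm
    have hm0 : 0 < pt.length := List.length_pos_of_ne_nil hne
    have hall : ∀ j, j ∈ 0 :: states ↔ (j < pt.length ∧ j ≤ P.length ∧ P.drop (P.length - j) = pt.take j) := by
      intro j
      rw [List.mem_cons, hst j]
      constructor
      · rintro (rfl | ⟨_, h2, h3, h4⟩)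
        · exact ⟨hm0, Nat.zero_le _, by simp⟩
        · exact ⟨h2, h3, h4⟩
      · rintro ⟨h2, h3, h4⟩
        rcases Nat.eq_zero_or_pos j with rfl | hj
        · exact Or.inl rfl
        · exact Or.inr ⟨hj, h2, h3, h4⟩
    have happ : P ++ tok :: rest = (P ++ [tok]) ++ rest := by simp
    simp only [pvAltLoop]
    cases hstep : pvAltStep pt pt.length tok (0 :: states) with
    | none =>
      obtain ⟨j, hj, hmt, hjm⟩ := (step_none_iff pt pt.length tok (0 :: states)).mp hstep
      obtain ⟨hjlt, hjP, hsuff⟩ := (hall j).mp hj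
      simp only [true_iff, List.length_cons]
      refine ⟨P.length - j, by omega, by omega, ?_⟩
      rw [happ, window_end (P ++ [tok]) rest pt _
            (by simp only [List.length_append, List.length_cons, List.length_nil]; omega),
        show pt = pt.take (j + 1) by rw [show j + 1 = pt.length by omega, List.take_length]]
      exact (ext_iff P tok pt j hjP (by omega)).mpr ⟨hsuff, hmt⟩
    | some ns =>
      have hnc : ¬ ∃ j ∈ 0 :: states, pt.getD j "" = tok ∧ j + 1 = pt.length := by
        rw [← step_none_iff]; simp [hstep]
      have hns : ∀ x, x ∈ ns ↔ (0 < x ∧ x < pt.length ∧ x ≤ (P ++ [tok]).length ∧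
          (P ++ [tok]).drop ((P ++ [tok]).length - x) = pt.take x) := by
        intro x
        rw [step_some_mem pt pt.length tok _ ns hstep x]
        simp only [List.length_append, List.length_cons, List.length_nil]
        constructor
        · rintro ⟨j, hj, hmt, rfl⟩
          obtain ⟨hjlt, hjP, hsuff⟩ := (hall j).mp hj
          have hne' : j + 1 ≠ pt.length := fun h => hnc ⟨j, hj, hmt, h⟩
          refine ⟨Nat.succ_pos _, by omega, by omega, ?_⟩
          rw [show P.length + 0 + 1 - (j + 1) = P.length - j by omega]
          exact (ext_iff P tok pt j hjP (by omega)).mpr ⟨hsuff, hmt⟩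
        · rintro ⟨hx0, hxm, hxP, hsuff⟩
          obtain ⟨j, rfl⟩ : ∃ j, x = j + 1 := ⟨x - 1, by omega⟩
          rw [show P.length + 0 + 1 - (j + 1) = P.length - j by omega] at hsuff
          obtain ⟨hs, hmt⟩ := (ext_iff P tok pt j (by omega) (by omega)).mp hsuff
          exact ⟨j, (hall j).mpr ⟨by omega, by omega, hs⟩, hmt, rfl⟩
      rw [loop_iff pt pt.length rfl hne rest (P ++ [tok]) ns hns, happ]
      simp only [List.length_append, List.length_cons, List.length_nil]
      constructor
      · rintro ⟨i, h1, h2, h3⟩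
        exact ⟨i, by omega, by omega, h3⟩
      · rintro ⟨i, h1, h2, h3⟩
        by_cases hc : P.length + 1 < i + pt.length
        · exact ⟨i, by omega, by omega, h3⟩
        · exfalso
          have hirm : i + pt.length = P.length + 1 := by omega
          have hwin : (P ++ [tok]).drop i = pt :=
            (window_end (P ++ [tok]) rest pt i
              (by simp only [List.length_append, List.length_cons, List.length_nil]; omega)).mp h3
          have hiP : i = P.length - (pt.length - 1) := by omega
          have hwin' : (P ++ [tok]).drop (P.length - (pt.length - 1)) = pt.take ((pt.length - 1) + 1) := by
            rw [show (pt.length - 1) + 1 = pt.length by omega, List.take_length, ← hiP]; exact hwin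
          obtain ⟨hs, hmt⟩ := (ext_iff P tok pt (pt.length - 1) (by omega) (by omega)).mp hwin'
          exact hnc ⟨pt.length - 1, (hall (pt.length - 1)).mpr ⟨by omega, by omega, hs⟩, hmt, by omega⟩

lemma portB_iff (tokens : List String) (phrase : String)
    (pt : List String) (hpt : pt = pvPhraseTokens phrase) (hne : pt ≠ []) :
    phrase_matches_py_alt tokens phrase = true ↔
      ∃ i : Nat, i + pt.length ≤ tokens.length ∧ (tokens.drop i).take pt.length = pt := by
  have hm0 : 0 < pt.length := List.length_pos_of_ne_nil hne
  unfold phrase_matches_py_alt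
  rw [tok_eq, ← hpt, if_neg hne,
    loop_iff pt pt.length rfl hne tokens [] [] (by intro j; simp; omega)]
  simp only [List.length_nil, List.nil_append, Nat.zero_add]
  constructor
  · rintro ⟨i, h1, _, h3⟩; exact ⟨i, h1, h3⟩
  · rintro ⟨i, h1, h3⟩; exact ⟨i, h1, by omega, h3⟩

-- ===== VERDICT (by name: the statement is the Claim_ definition above) =====
theorem phrase_matches_py_spec : Claim_equal_phrase_matches_py := by
  intro tokens phrase _
  unfold Spec_phrase_matches_py
  by_cases hne : pvPhraseTokens phrase = []
  · simp [phrase_matches_py, phrase_matches_py_alt, tok_eq, hne]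
  · have ha := portA_iff tokens phrase _ rfl hne
    have hb := portB_iff tokens phrase _ rfl hne
    cases hA : phrase_matches_py tokens phrase
    · cases hB : phrase_matches_py_alt tokens phrase
      · rfl
      · exact absurd (ha.mpr (hb.mp hB)) (by simp [hA])
    · exact (hb.mpr (ha.mp hA)).symm
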